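-- pv_equiv track=rewrite | github.com/crispweed/swapbill | module/SwapBill/ChooseInputs.py | ChooseInputs
-- ===== SOURCE A (Python) =====
-- def ChooseInputs(maxInputs, unspentAmounts, amountRequired):
-- 	if amountRequired == 0 or maxInputs == 0:
-- 		return ([], 0)
-- 	assert amountRequired > 0
--
-- 	sortedUnspent = []
-- 	for	i in range(len(unspentAmounts)):
-- 		sortedUnspent.append((unspentAmounts[i], i))
-- 	sortedUnspent.sort()
--
-- 	if maxInputs > len(unspentAmounts):
-- 		maxInputs = len(unspentAmounts)
--
-- 	spent = 0
-- 	result = []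
--
--
-- 	while spent < amountRequired and len(result) < maxInputs:
-- 		toAddI = sortedUnspent[len(result)][1]
-- 		result.append(toAddI)
-- 		spent += unspentAmounts[result[-1]]
--
-- 	startI = 0
-- 	while spent < amountRequired and startI + len(result) < len(unspentAmounts):
-- 		spent -= unspentAmounts[result[0]]
-- 		result = result[1:]
-- 		startI += 1
-- 		toAddI = sortedUnspent[startI + len(result)][1]
-- 		result.append(toAddI)
-- 		spent += unspentAmounts[result[-1]]
--
-- 	return (result, spent)
-- ===== SOURCE B (Python) =====
-- def ChooseInputs(maxInputs, unspentAmounts, amountRequired):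
--     if amountRequired == 0 or maxInputs == 0:
--         return ([], 0)
--     n = len(unspentAmounts)
--     pairs = sorted((a, i) for i, a in enumerate(unspentAmounts))
--     k = min(maxInputs, n)
--     prefix = [0]
--     t = 0
--     for a, _ in pairs:
--         t += a
--         prefix.append(t)
--     m = _first_prefix(prefix, amountRequired, k)
--     if m is not None:
--         return ([i for _, i in pairs[:m]], prefix[m])
--     s = _first_window(prefix, amountRequired, k, n)
--     return ([i for _, i in pairs[s:s + k]], prefix[s + k] - prefix[s])
--
-- def _first_prefix(prefix, req, k):
--     m = 1
--     while m <= k: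
--         if prefix[m] >= req:
--             return m
--         m += 1
--     return None
--
-- def _first_window(prefix, req, k, n):
--     s = 0
--     while s < n - k:
--         if prefix[s + k] - prefix[s] >= req:
--             return s
--         s += 1
--     return s
-- ===== Notes on version B (the rewrite author's own statement) =====
-- stated objective: alternative
-- what changed: Replaces A's two stateful while-loops (incremental append then slide-by-add/remove with leftover accumulator state) by a prefix-sum table over the sorted amounts: the smallest sufficient prefix and then the first sufficient window are located by direct prefix-difference lookups, and the result is produced as a slice of the sorted pairs.
-- outside the precondition, e.g. on ChooseInputs(-1, [], 5): A returns ([], 0), B raises IndexError; on ChooseInputs(0, [], -5): A returns ([], 0), B returns ([], 0)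
import Mathlib
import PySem

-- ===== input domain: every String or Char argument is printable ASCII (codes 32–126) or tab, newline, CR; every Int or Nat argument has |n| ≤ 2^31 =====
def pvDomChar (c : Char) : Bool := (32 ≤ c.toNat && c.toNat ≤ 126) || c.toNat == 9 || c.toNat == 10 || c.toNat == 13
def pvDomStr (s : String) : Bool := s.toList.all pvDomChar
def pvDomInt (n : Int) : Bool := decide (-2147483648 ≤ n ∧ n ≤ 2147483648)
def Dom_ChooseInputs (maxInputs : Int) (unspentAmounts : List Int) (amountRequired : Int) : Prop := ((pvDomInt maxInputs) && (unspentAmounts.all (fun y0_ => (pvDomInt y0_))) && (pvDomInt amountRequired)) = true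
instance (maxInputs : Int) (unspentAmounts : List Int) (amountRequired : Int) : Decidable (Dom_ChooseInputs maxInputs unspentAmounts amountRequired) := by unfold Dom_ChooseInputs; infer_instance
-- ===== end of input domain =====

-- B replaces A's incremental accumulate-then-slide loops by a prefix-sum table over the
-- sorted amounts with direct window lookups (objective: alternative; return value only).

-- ===== PORT A =====
-- first while loop: while spent < amountRequired and len(result) < maxInputs: append next sorted index
def pvA_phase1 (unspent : List Int) (req maxI : Int) :
    List (Int × Int) → Int → List Int → Int × List Int × List (Int × Int)
  | [], spent, result => (spent, result, [])  -- loop guard 'len(result) < maxInputs' can no longer hold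
  | p :: ps', spent, result =>
    if spent < req ∧ (result.length : Int) < maxI then
      -- spent += unspentAmounts[result[-1]] with result[-1] = p.2, always a valid index
      pvA_phase1 unspent req maxI ps' (spent + PySem.List.pyGetD unspent p.2 0) (result ++ [p.2])
    else (spent, result, p :: ps')

-- second while loop: drop result[0], append the next sorted index, keeping the window sum
def pvA_phase2 (unspent : List Int) (req : Int) :
    List (Int × Int) → Int → List Int → List Int × Int
  | [], spent, result => (result, spent)
  | p :: ps', spent, result =>
    if spent < req then
      match result with
      | [] => (result, spent)  -- Python raises IndexError here; outside Pre_ (maxInputs < 0)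
      | r0 :: rest =>
          pvA_phase2 unspent req ps'
            (spent - PySem.List.pyGetD unspent r0 0 + PySem.List.pyGetD unspent p.2 0)
            (rest ++ [p.2])
    else (result, spent)

def ChooseInputs (maxInputs : Int) (unspentAmounts : List Int) (amountRequired : Int) :
    List Int × Int :=
  if amountRequired = 0 ∨ maxInputs = 0 then ([], 0)
  else
    let sortedUnspent := PySem.List.sorted2
      ((PySem.List.enumerate unspentAmounts).map (fun q => (q.2, q.1)))
      (fun p => p.1) (fun p => p.2)
    let maxInputs' := if maxInputs > (unspentAmounts.length : Int) then
        (unspentAmounts.length : Int) else maxInputs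
    let st := pvA_phase1 unspentAmounts amountRequired maxInputs' sortedUnspent 0 []
    pvA_phase2 unspentAmounts amountRequired st.2.2 st.1 st.2.1

-- ===== PORT B =====
-- running-total prefix sums: prefix = [0]; for a, _ in pairs: t += a; prefix.append(t)
def pvB_prefix (t : Int) : List (Int × Int) → List Int
  | [] => []
  | p :: ps => (t + p.1) :: pvB_prefix (t + p.1) ps

-- _first_prefix: smallest m in m0..k with prefix[m] >= req ((k + 1 - m).toNat bounds the loop)
def pvB_firstPrefixGo (prefixL : List Int) (req k : Int) : Nat → Int → Option Int
  | 0, _ => none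
  | c + 1, m =>
    if m ≤ k then
      if req ≤ PySem.List.pyGetD prefixL m 0 then some m
      else pvB_firstPrefixGo prefixL req k c (m + 1)
    else none

def pvB_firstPrefix (prefixL : List Int) (req k m : Int) : Option Int :=
  pvB_firstPrefixGo prefixL req k (k + 1 - m).toNat m

-- _first_window: smallest s in s0..n-k with prefix[s+k] - prefix[s] >= req, else n-k
def pvB_firstWindowGo (prefixL : List Int) (req k n : Int) : Nat → Int → Int
  | 0, s => s
  | c + 1, s =>
    if s < n - k then
      if req ≤ PySem.List.pyGetD prefixL (s + k) 0 - PySem.List.pyGetD prefixL s 0 then s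
      else pvB_firstWindowGo prefixL req k n c (s + 1)
    else s

def pvB_firstWindow (prefixL : List Int) (req k n s : Int) : Int :=
  pvB_firstWindowGo prefixL req k n (n - k - s).toNat s

def ChooseInputs_alt (maxInputs : Int) (unspentAmounts : List Int) (amountRequired : Int) :
    List Int × Int :=
  if amountRequired = 0 ∨ maxInputs = 0 then ([], 0)
  else
    let n : Int := unspentAmounts.length
    let pairs := PySem.List.sorted2
      ((PySem.List.enumerate unspentAmounts).map (fun q => (q.2, q.1)))
      (fun p => p.1) (fun p => p.2)
    let k := min maxInputs n
    let prefixL := 0 :: pvB_prefix 0 pairs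
    match pvB_firstPrefix prefixL amountRequired k 1 with
    | some m =>
        ((PySem.List.slice pairs none (some m)).map (fun p => p.2),
         PySem.List.pyGetD prefixL m 0)
    | none =>
        let s := pvB_firstWindow prefixL amountRequired k n 0
        ((PySem.List.slice pairs (some s) (some (s + k))).map (fun p => p.2),
         PySem.List.pyGetD prefixL (s + k) 0 - PySem.List.pyGetD prefixL s 0)

-- ===== PRECONDITION & SPEC =====
-- A raises outside this (AssertionError for amountRequired < 0, IndexError for maxInputs < 0
-- on nonempty lists); negative counts/requirements are outside the natural domain, so the
-- degenerate corners where A still returns ([], 0) there are excluded too.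
def Pre_ChooseInputs (maxInputs : Int) (unspentAmounts : List Int) (amountRequired : Int) : Prop :=
  0 ≤ maxInputs ∧ 0 ≤ amountRequired
instance (maxInputs : Int) (unspentAmounts : List Int) (amountRequired : Int) :
    Decidable (Pre_ChooseInputs maxInputs unspentAmounts amountRequired) := by
  unfold Pre_ChooseInputs; infer_instance

def pvWitness_ChooseInputs : Int × List Int × Int := (2, [3, 1, 4], 5)

def Spec_ChooseInputs (maxInputs : Int) (unspentAmounts : List Int) (amountRequired : Int) (out : List Int × Int) : Prop := out = ChooseInputs_alt maxInputs unspentAmounts amountRequired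
instance (maxInputs : Int) (unspentAmounts : List Int) (amountRequired : Int) (out : List Int × Int) : Decidable (Spec_ChooseInputs maxInputs unspentAmounts amountRequired out) := by unfold Spec_ChooseInputs; infer_instance

-- ===== CLAIM (what is proved, stated in full; the proofs are below) =====
def Claim_equal_ChooseInputs : Prop := ∀ (maxInputs : Int) (unspentAmounts : List Int) (amountRequired : Int), Dom_ChooseInputs maxInputs unspentAmounts amountRequired → Pre_ChooseInputs maxInputs unspentAmounts amountRequired → Spec_ChooseInputs maxInputs unspentAmounts amountRequired (ChooseInputs maxInputs unspentAmounts amountRequired)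

-- ===== LEMMAS AND PROOFS =====

-- one-step unfolding lemmas (the loop bound just counts iterations)
lemma pv_firstPrefix_step (prefixL : List Int) (req k m : Int) :
    pvB_firstPrefix prefixL req k m =
      if m ≤ k then
        if req ≤ PySem.List.pyGetD prefixL m 0 then some m
        else pvB_firstPrefix prefixL req k (m + 1)
      else none := by
  unfold pvB_firstPrefix
  rcases hc : (k + 1 - m).toNat with _ | c
  · have hm : ¬ m ≤ k := by omega
    simp [pvB_firstPrefixGo, hm]
  · have hc' : (k - m).toNat = c := by omega
    simp [pvB_firstPrefixGo, hc']

lemma pv_firstWindow_step (prefixL : List Int) (req k n s : Int) :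
    pvB_firstWindow prefixL req k n s =
      if s < n - k then
        if req ≤ PySem.List.pyGetD prefixL (s + k) 0 - PySem.List.pyGetD prefixL s 0 then s
        else pvB_firstWindow prefixL req k n (s + 1)
      else s := by
  unfold pvB_firstWindow
  rcases hc : (n - k - s).toNat with _ | c
  · have hm : ¬ s < n - k := by omega
    simp [pvB_firstWindowGo, hm]
  · have hc' : (n - k - (s + 1)).toNat = c := by omega
    simp [pvB_firstWindowGo, hc']

lemma pvA_phase1_step (unspent : List Int) (req maxI : Int) (ps : List (Int × Int))
    (spent : Int) (result : List Int) :
    pvA_phase1 unspent req maxI ps spent result =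
      if spent < req ∧ (result.length : Int) < maxI then
        match ps with
        | [] => (spent, result, [])
        | p :: ps' =>
            pvA_phase1 unspent req maxI ps' (spent + PySem.List.pyGetD unspent p.2 0)
              (result ++ [p.2])
      else (spent, result, ps) := by
  cases ps
  · simp only [pvA_phase1]; split_ifs <;> rfl
  · simp only [pvA_phase1]

lemma pvA_phase2_step (unspent : List Int) (req : Int) (ps : List (Int × Int))
    (spent : Int) (result : List Int) :
    pvA_phase2 unspent req ps spent result =
      if spent < req then
        match ps with
        | [] => (result, spent)
        | p :: ps' =>
            match result with
            | [] => (result, spent)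
            | r0 :: rest =>
                pvA_phase2 unspent req ps'
                  (spent - PySem.List.pyGetD unspent r0 0 + PySem.List.pyGetD unspent p.2 0)
                  (rest ++ [p.2])
      else (result, spent) := by
  cases ps
  · simp only [pvA_phase2]; split_ifs with h
    · cases result <;> rfl
    · rfl
  · simp only [pvA_phase2]

-- every sorted pair (a, i) satisfies unspentAmounts[i] == a
lemma pv_lookup_of_mem (unspent : List Int) (p : Int × Int)
    (hp : p ∈ PySem.List.sorted2
      ((PySem.List.enumerate unspent).map (fun q => (q.2, q.1)))
      (fun p => p.1) (fun p => p.2)) :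
    PySem.List.pyGetD unspent p.2 0 = p.1 := by
  have hp' := (PySem.List.sorted2_perm _ _ _ _).mem_iff.mp hp
  rcases List.mem_map.mp hp' with ⟨q, hq, rfl⟩
  rcases (PySem.List.mem_enumerate_iff _ _ _).mp hq with ⟨k, hkl, rfl⟩
  simp only [zero_add]
  rw [PySem.List.pyGetD_natCast]
  simp [List.getD_eq_getElem?_getD, List.getElem?_eq_getElem hkl]

lemma pv_prefix_getD (ps : List (Int × Int)) (t : Int) (j : Nat) (hj : j ≤ ps.length) :
    PySem.List.pyGetD (t :: pvB_prefix t ps) (j : Int) 0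
      = t + ((ps.map Prod.fst).take j).sum := by
  induction ps generalizing t j with
  | nil =>
      have h0 : j = 0 := by simp at hj; omega
      subst h0
      rw [PySem.List.pyGetD_natCast]; simp
  | cons p ps ih =>
      cases j with
      | zero => rw [PySem.List.pyGetD_natCast]; simp
      | succ j =>
          have hj' : j ≤ ps.length := by simpa using hj
          have step : PySem.List.pyGetD (t :: pvB_prefix t (p :: ps)) ((j + 1 : Nat) : Int) 0
              = PySem.List.pyGetD ((t + p.1) :: pvB_prefix (t + p.1) ps) ((j : Nat) : Int) 0 := by
            rw [PySem.List.pyGetD_natCast, PySem.List.pyGetD_natCast]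
            simp [pvB_prefix]
          rw [step, ih (t + p.1) j hj']
          simp [List.take_succ_cons]
          ring

lemma pv_firstPrefix_some (P : List Int) (req k : Int) (m m' : Int)
    (h : pvB_firstPrefix P req k m = some m') :
    m ≤ m' ∧ m' ≤ k ∧ req ≤ PySem.List.pyGetD P m' 0 := by
  have key : ∀ fu (m : Int), (k + 1 - m).toNat ≤ fu → pvB_firstPrefix P req k m = some m' →
      m ≤ m' ∧ m' ≤ k ∧ req ≤ PySem.List.pyGetD P m' 0 := by
    intro fu
    induction fu with
    | zero =>
        intro m hfu h
        rw [pv_firstPrefix_step] at h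
        have hm : ¬ m ≤ k := by omega
        simp [hm] at h
    | succ fu ih =>
        intro m hfu h
        rw [pv_firstPrefix_step] at h
        by_cases hm : m ≤ k
        · by_cases hr : req ≤ PySem.List.pyGetD P m 0
          · simp only [if_pos hm, if_pos hr, Option.some.injEq] at h
            subst h; exact ⟨le_rfl, hm, hr⟩
          · simp only [if_pos hm, if_neg hr] at h
            obtain ⟨h1, h2, h3⟩ := ih (m + 1) (by omega) h
            exact ⟨by omega, h2, h3⟩
        · simp [hm] at h
  exact key ((k + 1 - m).toNat) m le_rfl h

lemma pv_firstWindow_bounds (P : List Int) (req k n s : Int) (hs : s ≤ n - k) :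
    s ≤ pvB_firstWindow P req k n s ∧ pvB_firstWindow P req k n s ≤ n - k := by
  have key : ∀ fu (s : Int), (n - k - s).toNat ≤ fu → s ≤ n - k →
      s ≤ pvB_firstWindow P req k n s ∧ pvB_firstWindow P req k n s ≤ n - k := by
    intro fu
    induction fu with
    | zero =>
        intro s hfu hs
        rw [pv_firstWindow_step]
        have : ¬ s < n - k := by omega
        simp [this, hs]
    | succ fu ih =>
        intro s hfu hs
        rw [pv_firstWindow_step]
        by_cases h1 : s < n - k
        · by_cases h2 : req ≤ PySem.List.pyGetD P (s + k) 0 - PySem.List.pyGetD P s 0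
          · simp [h1, h2, hs]
          · simp only [if_pos h1, if_neg h2]
            obtain ⟨ha, hb⟩ := ih (s + 1) (by omega) (by omega)
            exact ⟨by omega, hb⟩
        · simp [h1, hs]
  exact key ((n - k - s).toNat) s le_rfl hs

lemma pv_phase1_run (unspent : List Int) (req : Int) (ps : List (Int × Int)) (kN : Nat)
    (Hlook : ∀ p ∈ ps, PySem.List.pyGetD unspent p.2 0 = p.1)
    (hk : kN ≤ ps.length) :
    ∀ t : Nat, t ≤ kN →
    pvA_phase1 unspent req (kN : Int) (ps.drop t) (((ps.map Prod.fst).take t).sum)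
        ((ps.take t).map (fun p => p.2)) =
      if ((ps.map Prod.fst).take t).sum < req then
        match pvB_firstPrefix (0 :: pvB_prefix 0 ps) req (kN : Int) ((t : Int) + 1) with
        | some m => (((ps.map Prod.fst).take m.toNat).sum,
            (ps.take m.toNat).map (fun p => p.2), ps.drop m.toNat)
        | none => (((ps.map Prod.fst).take kN).sum,
            (ps.take kN).map (fun p => p.2), ps.drop kN)
      else (((ps.map Prod.fst).take t).sum, (ps.take t).map (fun p => p.2), ps.drop t) := by
  have hterm :
      pvA_phase1 unspent req (kN : Int) (ps.drop kN) (((ps.map Prod.fst).take kN).sum)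
          ((ps.take kN).map (fun p => p.2)) =
        if ((ps.map Prod.fst).take kN).sum < req then
          match pvB_firstPrefix (0 :: pvB_prefix 0 ps) req (kN : Int) ((kN : Int) + 1) with
          | some m => (((ps.map Prod.fst).take m.toNat).sum,
              (ps.take m.toNat).map (fun p => p.2), ps.drop m.toNat)
          | none => (((ps.map Prod.fst).take kN).sum,
              (ps.take kN).map (fun p => p.2), ps.drop kN)
        else (((ps.map Prod.fst).take kN).sum, (ps.take kN).map (fun p => p.2), ps.drop kN) := by
    have hlen : ((ps.take kN).map (fun p => p.2)).length = kN := by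
      simp [List.length_take, Nat.min_eq_left hk]
    have hguard : ¬ (((ps.map Prod.fst).take kN).sum < req ∧
        ((((ps.take kN).map (fun p => p.2)).length : Int) < (kN : Int))) := by
      rw [hlen]; simp
    rw [pvA_phase1_step, if_neg hguard]
    have hnone : pvB_firstPrefix (0 :: pvB_prefix 0 ps) req (kN : Int) ((kN : Int) + 1) = none := by
      rw [pv_firstPrefix_step]
      have : ¬ (kN : Int) + 1 ≤ (kN : Int) := by omega
      simp [this]
    rw [hnone]
    split_ifs <;> rfl
  have key : ∀ fu t, kN - t ≤ fu → t ≤ kN →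
      pvA_phase1 unspent req (kN : Int) (ps.drop t) (((ps.map Prod.fst).take t).sum)
          ((ps.take t).map (fun p => p.2)) =
        if ((ps.map Prod.fst).take t).sum < req then
          match pvB_firstPrefix (0 :: pvB_prefix 0 ps) req (kN : Int) ((t : Int) + 1) with
          | some m => (((ps.map Prod.fst).take m.toNat).sum,
              (ps.take m.toNat).map (fun p => p.2), ps.drop m.toNat)
          | none => (((ps.map Prod.fst).take kN).sum,
              (ps.take kN).map (fun p => p.2), ps.drop kN)
        else (((ps.map Prod.fst).take t).sum, (ps.take t).map (fun p => p.2), ps.drop t) := by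
    intro fu
    induction fu with
    | zero =>
        intro t hfu ht
        have : t = kN := by omega
        subst this
        exact hterm
    | succ fu ih =>
        intro t hfu ht
        by_cases htk : t < kN
        · have htlen : t < ps.length := lt_of_lt_of_le htk hk
          have hlen : ((ps.take t).map (fun p => p.2)).length = t := by
            simp [List.length_take, Nat.min_eq_left (le_of_lt htlen)]
          by_cases hsp : ((ps.map Prod.fst).take t).sum < req
          · -- loop body runs
            have e1 : ((ps.map Prod.fst).take t).sum + PySem.List.pyGetD unspent (ps[t]).2 0
                = ((ps.map Prod.fst).take (t + 1)).sum := by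
              rw [Hlook (ps[t]) (List.getElem_mem htlen)]
              rw [List.sum_take_succ _ t (by simpa using htlen)]
              simp
            have e2 : (ps.take t).map (fun p => p.2) ++ [(ps[t]).2]
                = (ps.take (t + 1)).map (fun p => p.2) := by
              have hts : ps.take (t + 1) = ps.take t ++ [ps[t]] := by
                rw [List.take_add_one, List.getElem?_eq_getElem htlen]
                rfl
              rw [hts, List.map_append]
              rfl
            have lstep : pvA_phase1 unspent req (kN : Int) (ps.drop t)
                (((ps.map Prod.fst).take t).sum) ((ps.take t).map (fun p => p.2)) =
                pvA_phase1 unspent req (kN : Int) (ps.drop (t + 1))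
                  (((ps.map Prod.fst).take (t + 1)).sum)
                  ((ps.take (t + 1)).map (fun p => p.2)) := by
              conv_lhs => rw [List.drop_eq_getElem_cons htlen]
              rw [pvA_phase1_step]
              rw [if_pos ⟨hsp, by rw [hlen]; exact_mod_cast htk⟩]
              show pvA_phase1 unspent req (kN : Int) (ps.drop (t + 1))
                  (((ps.map Prod.fst).take t).sum + PySem.List.pyGetD unspent (ps[t]).2 0)
                  ((ps.take t).map (fun p => p.2) ++ [(ps[t]).2]) = _
              rw [e1, e2]
            rw [lstep, ih (t + 1) (by omega) (by omega), if_pos hsp]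
            have hget : PySem.List.pyGetD (0 :: pvB_prefix 0 ps) ((t : Int) + 1) 0
                = ((ps.map Prod.fst).take (t + 1)).sum := by
              have := pv_prefix_getD ps 0 (t + 1) (by omega)
              push_cast at this ⊢
              rw [this]; ring
            have hstep : pvB_firstPrefix (0 :: pvB_prefix 0 ps) req (kN : Int) ((t : Int) + 1)
                = if req ≤ ((ps.map Prod.fst).take (t + 1)).sum then some ((t : Int) + 1)
                  else pvB_firstPrefix (0 :: pvB_prefix 0 ps) req (kN : Int) ((t : Int) + 1 + 1) := by
              rw [pv_firstPrefix_step]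
              rw [if_pos (by exact_mod_cast htk : (t : Int) + 1 ≤ (kN : Int)), hget]
            by_cases hr : req ≤ ((ps.map Prod.fst).take (t + 1)).sum
            · rw [hstep, if_pos hr, if_neg (by omega)]
              show _ = (((ps.map Prod.fst).take (((t : Int) + 1).toNat)).sum,
                  (ps.take (((t : Int) + 1).toNat)).map (fun p => p.2),
                  ps.drop (((t : Int) + 1).toNat))
              rw [show ((t : Int) + 1).toNat = t + 1 from by omega]
            · rw [hstep, if_neg hr, if_pos (by omega),
                show ((t + 1 : Nat) : Int) + 1 = (t : Int) + 1 + 1 from by push_cast; ring]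
          · have hguard : ¬ (((ps.map Prod.fst).take t).sum < req ∧
                ((((ps.take t).map (fun p => p.2)).length : Int) < (kN : Int))) := by
              intro h; exact hsp h.1
            rw [pvA_phase1_step, if_neg hguard, if_neg hsp]
        · have : t = kN := by omega
          subst this
          exact hterm
  intro t ht
  exact key (kN - t) t le_rfl ht

lemma pv_phase2_run (unspent : List Int) (req : Int) (ps : List (Int × Int)) (kN : Nat)
    (Hlook : ∀ p ∈ ps, PySem.List.pyGetD unspent p.2 0 = p.1)
    (hk : kN ≤ ps.length) (hk1 : 1 ≤ kN) :
    ∀ sN : Nat, sN + kN ≤ ps.length →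
    pvA_phase2 unspent req (ps.drop (sN + kN))
        (((ps.map Prod.fst).take (sN + kN)).sum - ((ps.map Prod.fst).take sN).sum)
        (((ps.drop sN).take kN).map (fun p => p.2)) =
      (((ps.drop (pvB_firstWindow (0 :: pvB_prefix 0 ps) req (kN : Int) (ps.length : Int)
            (sN : Int)).toNat).take kN).map (fun p => p.2),
       ((ps.map Prod.fst).take ((pvB_firstWindow (0 :: pvB_prefix 0 ps) req (kN : Int)
            (ps.length : Int) (sN : Int)).toNat + kN)).sum
         - ((ps.map Prod.fst).take ((pvB_firstWindow (0 :: pvB_prefix 0 ps) req (kN : Int)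
            (ps.length : Int) (sN : Int)).toNat)).sum) := by
  obtain ⟨kk, rfl⟩ : ∃ kk, kN = kk + 1 := ⟨kN - 1, by omega⟩
  have key : ∀ fu sN, ps.length - (sN + (kk + 1)) ≤ fu → sN + (kk + 1) ≤ ps.length →
      pvA_phase2 unspent req (ps.drop (sN + (kk + 1)))
          (((ps.map Prod.fst).take (sN + (kk + 1))).sum - ((ps.map Prod.fst).take sN).sum)
          (((ps.drop sN).take (kk + 1)).map (fun p => p.2)) =
        (((ps.drop (pvB_firstWindow (0 :: pvB_prefix 0 ps) req ((kk + 1 : Nat) : Int)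
              (ps.length : Int) (sN : Int)).toNat).take (kk + 1)).map (fun p => p.2),
         ((ps.map Prod.fst).take ((pvB_firstWindow (0 :: pvB_prefix 0 ps) req ((kk + 1 : Nat) : Int)
              (ps.length : Int) (sN : Int)).toNat + (kk + 1))).sum
           - ((ps.map Prod.fst).take ((pvB_firstWindow (0 :: pvB_prefix 0 ps) req
              ((kk + 1 : Nat) : Int) (ps.length : Int) (sN : Int)).toNat)).sum) := by
    intro fu
    induction fu with
    | zero =>
        intro sN hfu hsn
        have hend : sN + (kk + 1) = ps.length := by omega
        have hW : PySem.List.pyGetD (0 :: pvB_prefix 0 ps) ((sN : Int) + ((kk + 1 : Nat) : Int)) 0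
              - PySem.List.pyGetD (0 :: pvB_prefix 0 ps) ((sN : Int)) 0
            = ((ps.map Prod.fst).take (sN + (kk + 1))).sum - ((ps.map Prod.fst).take sN).sum := by
          have h1 := pv_prefix_getD ps 0 (sN + (kk + 1)) (by omega)
          have h2 := pv_prefix_getD ps 0 sN (by omega)
          push_cast at h1 h2 ⊢
          rw [h1, h2]; ring
        have hfw : pvB_firstWindow (0 :: pvB_prefix 0 ps) req ((kk + 1 : Nat) : Int)
            (ps.length : Int) (sN : Int) = (sN : Int) := by
          rw [pv_firstWindow_step]
          by_cases hlt : (sN : Int) < (ps.length : Int) - ((kk + 1 : Nat) : Int)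
          · exfalso; push_cast at hlt; omega
          · rw [if_neg hlt]
        rw [hfw, Int.toNat_natCast]
        by_cases hwr : ((ps.map Prod.fst).take (sN + (kk + 1))).sum
            - ((ps.map Prod.fst).take sN).sum < req
        · rw [pvA_phase2_step, if_pos hwr]
          have : ps.drop (sN + (kk + 1)) = [] := by
            rw [List.drop_eq_nil_iff]; omega
          rw [this]
        · rw [pvA_phase2_step, if_neg hwr]
    | succ fu ih =>
        intro sN hfu hsn
        have hW : PySem.List.pyGetD (0 :: pvB_prefix 0 ps) ((sN : Int) + ((kk + 1 : Nat) : Int)) 0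
              - PySem.List.pyGetD (0 :: pvB_prefix 0 ps) ((sN : Int)) 0
            = ((ps.map Prod.fst).take (sN + (kk + 1))).sum - ((ps.map Prod.fst).take sN).sum := by
          have h1 := pv_prefix_getD ps 0 (sN + (kk + 1)) (by omega)
          have h2 := pv_prefix_getD ps 0 sN (by omega)
          push_cast at h1 h2 ⊢
          rw [h1, h2]; ring
        by_cases hwr : ((ps.map Prod.fst).take (sN + (kk + 1))).sum
            - ((ps.map Prod.fst).take sN).sum < req
        · by_cases hend : sN + (kk + 1) = ps.length
          · have hfw : pvB_firstWindow (0 :: pvB_prefix 0 ps) req ((kk + 1 : Nat) : Int)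
                (ps.length : Int) (sN : Int) = (sN : Int) := by
              rw [pv_firstWindow_step]
              by_cases hlt : (sN : Int) < (ps.length : Int) - ((kk + 1 : Nat) : Int)
              · exfalso; push_cast at hlt; omega
              · rw [if_neg hlt]
            rw [hfw, Int.toNat_natCast]
            rw [pvA_phase2_step, if_pos hwr]
            have : ps.drop (sN + (kk + 1)) = [] := by
              rw [List.drop_eq_nil_iff]; omega
            rw [this]
          · -- step
            have hmid : sN + (kk + 1) < ps.length := by omega
            have hsN : sN < ps.length := by omega
            have ewin : (ps.drop sN).take (kk + 1)
                = ps[sN] :: ((ps.drop (sN + 1)).take kk) := by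
              rw [List.drop_eq_getElem_cons hsN, List.take_succ_cons]
            have eidx : sN + (kk + 1) = sN + 1 + kk := by omega
            have e4 : ((ps.drop (sN + 1)).take kk).map (fun p => p.2) ++ [(ps[sN + (kk + 1)]).2]
                = ((ps.drop (sN + 1)).take (kk + 1)).map (fun p => p.2) := by
              rw [List.take_succ]
              have hg : (ps.drop (sN + 1))[kk]? = some (ps[sN + (kk + 1)]) := by
                rw [List.getElem?_drop]
                rw [List.getElem?_eq_getElem (by omega)]
                simp only [eidx]
              rw [hg]
              simp
            have e3 : (((ps.map Prod.fst).take (sN + (kk + 1))).sum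
                  - ((ps.map Prod.fst).take sN).sum)
                  - PySem.List.pyGetD unspent (ps[sN]).2 0
                  + PySem.List.pyGetD unspent (ps[sN + (kk + 1)]).2 0
                = ((ps.map Prod.fst).take (sN + 1 + (kk + 1))).sum
                  - ((ps.map Prod.fst).take (sN + 1)).sum := by
              rw [Hlook (ps[sN]) (List.getElem_mem hsN),
                  Hlook (ps[sN + (kk + 1)]) (List.getElem_mem hmid)]
              have hs1 := List.sum_take_succ (ps.map Prod.fst) sN (by simpa using hsN)
              have hs2 := List.sum_take_succ (ps.map Prod.fst) (sN + (kk + 1))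
                (by simpa using hmid)
              have hsN' : sN < (ps.map Prod.fst).length := by simpa using hsN
              have hmid' : sN + (kk + 1) < (ps.map Prod.fst).length := by simpa using hmid
              have g1 : (ps.map Prod.fst)[sN]'hsN' = (ps[sN]).1 := by simp
              have g2 : (ps.map Prod.fst)[sN + (kk + 1)]'hmid' = (ps[sN + (kk + 1)]).1 := by
                simp
              rw [g1] at hs1
              rw [g2] at hs2
              have : sN + 1 + (kk + 1) = sN + (kk + 1) + 1 := by omega
              rw [this, hs2]
              omega
            have lstep : pvA_phase2 unspent req (ps.drop (sN + (kk + 1)))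
                (((ps.map Prod.fst).take (sN + (kk + 1))).sum - ((ps.map Prod.fst).take sN).sum)
                (((ps.drop sN).take (kk + 1)).map (fun p => p.2)) =
                pvA_phase2 unspent req (ps.drop (sN + 1 + (kk + 1)))
                  (((ps.map Prod.fst).take (sN + 1 + (kk + 1))).sum
                    - ((ps.map Prod.fst).take (sN + 1)).sum)
                  (((ps.drop (sN + 1)).take (kk + 1)).map (fun p => p.2)) := by
              conv_lhs => rw [List.drop_eq_getElem_cons hmid, ewin]
              rw [pvA_phase2_step, if_pos hwr]
              simp only [List.map_cons]
              rw [e4, e3]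
              have : sN + (kk + 1) + 1 = sN + 1 + (kk + 1) := by omega
              rw [this]
            have hfwstep : pvB_firstWindow (0 :: pvB_prefix 0 ps) req ((kk + 1 : Nat) : Int)
                (ps.length : Int) (sN : Int)
                = pvB_firstWindow (0 :: pvB_prefix 0 ps) req ((kk + 1 : Nat) : Int)
                  (ps.length : Int) ((sN + 1 : Nat) : Int) := by
              rw [pv_firstWindow_step]
              rw [if_pos (by push_cast; omega)]
              rw [if_neg (by rw [hW]; omega)]
              push_cast
              ring_nf
            rw [lstep, ih (sN + 1) (by omega) (by omega), hfwstep]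
        · -- window already sufficient: A stops, firstWindow returns sN
          have hfw : pvB_firstWindow (0 :: pvB_prefix 0 ps) req ((kk + 1 : Nat) : Int)
              (ps.length : Int) (sN : Int) = (sN : Int) := by
            rw [pv_firstWindow_step]
            by_cases hlt : (sN : Int) < (ps.length : Int) - ((kk + 1 : Nat) : Int)
            · rw [if_pos hlt, if_pos (by rw [hW]; omega)]
            · rw [if_neg hlt]
          rw [hfw, Int.toNat_natCast]
          rw [pvA_phase2_step, if_neg hwr]
  intro sN hsn
  exact key (ps.length - (sN + (kk + 1))) sN le_rfl hsn

-- ===== VERDICT (by name: the statement is the Claim_ definition above) =====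
theorem ChooseInputs_spec : Claim_equal_ChooseInputs := by
  intro maxI unspent req _hdom hpre
  obtain ⟨hm0, hr0⟩ := hpre
  unfold Spec_ChooseInputs
  by_cases h0 : req = 0 ∨ maxI = 0
  · simp only [ChooseInputs, ChooseInputs_alt, if_pos h0]
  · simp only [ChooseInputs, ChooseInputs_alt, if_neg h0]
    push_neg at h0
    obtain ⟨hreq0, hmax0⟩ := h0
    have hr1 : 0 < req := by omega
    have hm1 : 0 < maxI := by omega
    set ps := PySem.List.sorted2 ((PySem.List.enumerate unspent).map (fun q => (q.2, q.1)))
      (fun p => p.1) (fun p => p.2) with hps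
    have Hlook : ∀ p ∈ ps, PySem.List.pyGetD unspent p.2 0 = p.1 := by
      intro p hp; rw [hps] at hp; exact pv_lookup_of_mem unspent p hp
    have hlen : ps.length = unspent.length := by
      rw [hps, (PySem.List.sorted2_perm _ _ _ _).length_eq, List.length_map,
        PySem.List.length_enumerate]
    set kN : Nat := min maxI.toNat unspent.length with hkN
    have hk : kN ≤ ps.length := by rw [hlen, hkN]; exact Nat.min_le_right _ _
    have hkc : (kN : Int) = min maxI (unspent.length : Int) := by
      rw [hkN]; simp [Nat.cast_min, Int.toNat_of_nonneg hm0]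
    have hcap : (if maxI > (unspent.length : Int) then (unspent.length : Int) else maxI)
        = (kN : Int) := by
      rw [hkc]; split_ifs with h
      · exact (min_eq_right (le_of_lt h)).symm
      · exact (min_eq_left (not_lt.mp h)).symm
    rw [hcap, ← hkc, show ((unspent.length : Int)) = ((ps.length : Int)) from by rw [hlen]]
    have h1 := pv_phase1_run unspent req ps kN Hlook hk 0 (Nat.zero_le _)
    simp only [List.drop_zero, List.take_zero, List.map_nil, List.sum_nil, Nat.cast_zero,
      zero_add] at h1
    rw [if_pos hr1] at h1
    rcases hfp : pvB_firstPrefix (0 :: pvB_prefix 0 ps) req (kN : Int) 1 with _ | m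
    · -- no sufficient prefix: the window phase decides
      have h1' : pvA_phase1 unspent req (kN : Int) ps 0 [] =
          (((ps.map Prod.fst).take kN).sum, (ps.take kN).map (fun p => p.2), ps.drop kN) := by
        rw [h1, hfp]
      rw [h1']
      show pvA_phase2 unspent req (ps.drop kN) (((ps.map Prod.fst).take kN).sum)
          ((ps.take kN).map (fun p => p.2)) =
        ((PySem.List.slice ps
            (some (pvB_firstWindow (0 :: pvB_prefix 0 ps) req (kN : Int) ((ps.length : Int)) 0))
            (some (pvB_firstWindow (0 :: pvB_prefix 0 ps) req (kN : Int) ((ps.length : Int)) 0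
              + (kN : Int)))).map (fun p => p.2),
          PySem.List.pyGetD (0 :: pvB_prefix 0 ps)
            (pvB_firstWindow (0 :: pvB_prefix 0 ps) req (kN : Int) ((ps.length : Int)) 0
              + (kN : Int)) 0
          - PySem.List.pyGetD (0 :: pvB_prefix 0 ps)
            (pvB_firstWindow (0 :: pvB_prefix 0 ps) req (kN : Int) ((ps.length : Int)) 0) 0)
      by_cases hn0 : unspent.length = 0
      · have hps0 : ps = [] := List.length_eq_zero_iff.mp (by omega)
        have hk0 : kN = 0 := by omega
        have hfw0 : pvB_firstWindow (0 :: pvB_prefix 0 []) req 0 0 0 = 0 := by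
          rw [pv_firstWindow_step]; norm_num
        simp only [hps0, hk0, Nat.cast_zero, List.drop_nil, List.take_nil, List.map_nil,
          List.sum_nil, List.length_nil]
        rw [pvA_phase2_step, if_pos hr1, hfw0]
        norm_num
        rw [PySem.List.slice_to ([] : List (Int × Int)) (le_refl (0 : Int))]
        simp
      · have hk1 : 1 ≤ kN := by omega
        have h2 := pv_phase2_run unspent req ps kN Hlook hk hk1 0 (by omega)
        simp only [Nat.zero_add, List.drop_zero, Nat.cast_zero, List.take_zero, List.map_nil,
          List.sum_nil, sub_zero] at h2
        rw [h2]
        obtain ⟨hs0, hsk⟩ := pv_firstWindow_bounds (0 :: pvB_prefix 0 ps) req (kN : Int)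
          ((ps.length : Int)) 0 (by omega)
        set s := pvB_firstWindow (0 :: pvB_prefix 0 ps) req (kN : Int) ((ps.length : Int)) 0
          with hsdef
        rw [PySem.List.slice_toNat ps hs0 (by omega)]
        rw [show ((s + (kN : Int)).toNat - s.toNat) = kN from by omega]
        have e1 : PySem.List.pyGetD (0 :: pvB_prefix 0 ps) (s + (kN : Int)) 0
            = ((ps.map Prod.fst).take (s.toNat + kN)).sum := by
          have h := pv_prefix_getD ps 0 (s.toNat + kN) (by omega)
          rw [show ((s.toNat + kN : Nat) : Int) = s + (kN : Int) from by omega] at h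
          rw [h]; ring
        have e2 : PySem.List.pyGetD (0 :: pvB_prefix 0 ps) s 0
            = ((ps.map Prod.fst).take s.toNat).sum := by
          have h := pv_prefix_getD ps 0 s.toNat (by omega)
          rw [show ((s.toNat : Nat) : Int) = s from by omega] at h
          rw [h]; ring
        rw [e1, e2]
    · -- a sufficient prefix exists
      obtain ⟨h1m, hmk, hreqm⟩ := pv_firstPrefix_some _ req _ 1 m hfp
      have hmN : m.toNat ≤ ps.length := by omega
      have hSm : PySem.List.pyGetD (0 :: pvB_prefix 0 ps) m 0
          = ((ps.map Prod.fst).take m.toNat).sum := by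
        have h := pv_prefix_getD ps 0 m.toNat hmN
        rw [show ((m.toNat : Nat) : Int) = m from by omega] at h
        rw [h]; ring
      have h1' : pvA_phase1 unspent req (kN : Int) ps 0 [] =
          (((ps.map Prod.fst).take m.toNat).sum, (ps.take m.toNat).map (fun p => p.2),
            ps.drop m.toNat) := by rw [h1, hfp]
      rw [h1']
      show pvA_phase2 unspent req (ps.drop m.toNat) (((ps.map Prod.fst).take m.toNat).sum)
          ((ps.take m.toNat).map (fun p => p.2)) =
        ((PySem.List.slice ps none (some m)).map (fun p => p.2),
          PySem.List.pyGetD (0 :: pvB_prefix 0 ps) m 0)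
      rw [pvA_phase2_step, if_neg (by rw [hSm] at hreqm; omega)]
      rw [PySem.List.slice_to ps (by omega : (0 : Int) ≤ m), hSm]
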